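-- pv_equiv track=rewrite | github.com/MihaiStreames/AlgorithmsForEveryone | Python/src/TPs/TP0/COMPLEX_0_3.py | g2
-- ===== SOURCE A (Python) =====
-- def g2(n: int) -> int:
--     # Theta(n) - O(2^n)) / Omega(n)
--     ret = 0
--     k = 1
--     while k <= n:
--         for j in range(k):
--             ret += j
--         k *= 2
--     return ret
-- ===== SOURCE B (Python) =====
-- def g2(n: int) -> int:
--     # Fully closed form: with p = 2**n.bit_length(), the answer is
--     # ((p*p - 1)//3 - (p - 1))//2  (sum of k*(k-1)/2 over powers of two k <= n).
--     if n < 1: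
--         return 0
--     p = 1 << n.bit_length()
--     return ((p * p - 1) // 3 - (p - 1)) // 2
-- ===== Notes on version B (the rewrite author's own statement) =====
-- stated objective: faster
-- what changed: The doubling loop with its inner range-sum is replaced by a single closed-form expression (geometric-series identity over the powers of two, using bit_length), no loop at all.
import Mathlib
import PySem

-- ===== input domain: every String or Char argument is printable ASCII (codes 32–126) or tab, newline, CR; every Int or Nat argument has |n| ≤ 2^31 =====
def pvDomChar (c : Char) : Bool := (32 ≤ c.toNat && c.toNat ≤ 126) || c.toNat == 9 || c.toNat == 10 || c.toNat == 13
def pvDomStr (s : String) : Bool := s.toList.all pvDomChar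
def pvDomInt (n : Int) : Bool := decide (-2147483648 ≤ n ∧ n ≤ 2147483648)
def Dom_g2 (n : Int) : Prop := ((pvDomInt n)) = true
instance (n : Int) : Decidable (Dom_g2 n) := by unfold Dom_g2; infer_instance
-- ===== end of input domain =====

-- B replaces A's doubling loop (with an inner range sum) by one closed-form expression; measured faster (asymptotic).

-- ===== PORT A =====
-- while k <= n: for j in range(k): ret += j; k *= 2   (fuel only makes the loop total; n.toNat+1 steps always suffice)
def g2Loop (fuel : Nat) (n ret k : Int) : Int :=
  match fuel with
  | 0 => ret
  | fuel + 1 =>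
    if k ≤ n then
      g2Loop fuel n ((PySem.List.pyRange 0 k 1).foldl (fun r j => r + j) ret) (k * 2)
    else ret

def g2 (n : Int) : Int := g2Loop (n.toNat + 1) n 0 1

-- ===== PORT B =====
-- if n < 1: return 0; p = 1 << n.bit_length(); return ((p*p - 1)//3 - (p - 1))//2
-- (n.bit_length() for n ≥ 1 is Nat.log2 n + 1; '//' is PySem.Int.floordiv)
def g2_alt (n : Int) : Int :=
  if n < 1 then 0
  else
    let p : Int := 2 ^ (n.toNat.log2 + 1)
    PySem.Int.floordiv (PySem.Int.floordiv (p * p - 1) 3 - (p - 1)) 2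

-- ===== PRECONDITION & SPEC =====
def Spec_g2 (n : Int) (out : Int) : Prop := out = g2_alt n
instance (n : Int) (out : Int) : Decidable (Spec_g2 n out) := by unfold Spec_g2; infer_instance

-- ===== CLAIM (what is proved, stated in full; the proofs are below) =====
def Claim_equal_g2 : Prop := ∀ (n : Int), Dom_g2 n → Spec_g2 n (g2 n)

-- ===== LEMMAS AND PROOFS =====

-- twice the sum of range(m) is m*(m-1)
lemma pv_two_sum_pyRange (m : Nat) :
    2 * (PySem.List.pyRange 0 (m : Int) 1).sum = (m : Int) * ((m : Int) - 1) := by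
  induction m with
  | zero => simp [PySem.List.pyRange_one_eq_nil]
  | succ m ih =>
    have h : ((m + 1 : Nat) : Int) = (m : Int) + 1 := by push_cast; ring
    rw [h, PySem.List.pyRange_one_succ_right (by positivity)]
    rw [List.sum_append]
    simp only [List.sum_cons, List.sum_nil, add_zero]
    linear_combination ih

-- A's inner for-loop doubles to k*(k-1) over the starting accumulator
lemma pv_inner_double (ret k : Int) (hk : 1 ≤ k) :
    2 * ((PySem.List.pyRange 0 k 1).foldl (fun r j => r + j) ret)
      = 2 * ret + k * (k - 1) := by
  have hfold := PySem.List.foldl_add (l := PySem.List.pyRange 0 k 1) (g := fun j => j) (a := ret)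
  simp only [List.map_id_fun', id] at hfold
  rw [hfold]
  have hk0 : k = ((k.toNat : Nat) : Int) := by omega
  have h2 := pv_two_sum_pyRange k.toNat
  rw [← hk0] at h2
  linarith

-- the loop returns the accumulator as soon as its guard fails, whatever the fuel
lemma pv_loop_stop (fuel : Nat) (n ret k : Int) (h : ¬ k ≤ n) : g2Loop fuel n ret k = ret := by
  cases fuel <;> simp [g2Loop, h]

-- six times A's loop value, in closed form: if 2^s·k ≤ n < 2^(s+1)·k then the loop
-- runs s+1 more times and contributes k²(4^(s+1)−1) − 3k(2^(s+1)−1)  (all over /6)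
lemma pv_loop_closed (s : Nat) :
    ∀ (fuel : Nat) (n ret k : Int), 1 ≤ k → s < fuel →
      2 ^ s * k ≤ n → n < 2 ^ (s + 1) * k →
      6 * g2Loop fuel n ret k
        = 6 * ret + k * k * (4 ^ (s + 1) - 1) - 3 * k * (2 ^ (s + 1) - 1) := by
  induction s with
  | zero =>
    intro fuel n ret k hk hfuel hlo hhi
    match fuel, hfuel with
    | fuel + 1, _ =>
      simp only [g2Loop]
      rw [if_pos (by simpa using hlo)]
      have hstop : ¬ (k * 2 ≤ n) := by
        have h2 : (2:Int) ^ (0 + 1) = 2 := by norm_num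
        rw [h2] at hhi; omega
      rw [pv_loop_stop fuel n _ _ hstop]
      have := pv_inner_double ret k hk; ring_nf; ring_nf at this; omega
  | succ s ih =>
    intro fuel n ret k hk hfuel hlo hhi
    match fuel, hfuel with
    | fuel + 1, _ =>
      have hkn : k ≤ n := le_trans (by nlinarith [pow_pos (by norm_num : (0:Int) < 2) (s+1)]) hlo
      simp only [g2Loop, if_pos hkn]
      have hrec := ih fuel n ((PySem.List.pyRange 0 k 1).foldl (fun r j => r + j) ret) (k * 2)
        (by omega) (by omega)
        (by have : (2:Int) ^ (s + 1) * k = 2 ^ s * (k * 2) := by ring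
            rw [← this]; exact hlo)
        (by have : (2:Int) ^ (s + 1 + 1) * k = 2 ^ (s + 1) * (k * 2) := by ring
            rw [← this]; exact hhi)
      rw [hrec]
      have hin := pv_inner_double ret k hk
      have e4 : (4:Int) ^ (s + 1 + 1) = 4 * 4 ^ (s + 1) := by ring
      have e2 : (2:Int) ^ (s + 1 + 1) = 2 * 2 ^ (s + 1) := by ring
      rw [e4, e2]; nlinarith [hin]

-- Nat.log2 is the loop's iteration exponent: 2^(log2 m) ≤ m < 2^(log2 m + 1) for m ≠ 0
lemma pv_log2_bounds (m : Nat) (hm : m ≠ 0) :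
    2 ^ m.log2 ≤ m ∧ m < 2 ^ (m.log2 + 1) := by
  rw [Nat.log2_eq_log_two]
  exact ⟨Nat.pow_log_le_self 2 hm, Nat.lt_pow_succ_log_self (by norm_num) m⟩

-- exact-division facts for B's two floordivs
lemma pv_three_dvd (t : Nat) : (3 : Int) ∣ 4 ^ t - 1 := by
  induction t with
  | zero => simp
  | succ t ih =>
    have : (4:Int) ^ (t + 1) - 1 = 4 * (4 ^ t - 1) + 3 := by ring
    rw [this]; exact dvd_add (Dvd.dvd.mul_left ih 4) ⟨1, by ring⟩

-- ===== VERDICT (by name: the statement is the Claim_ definition above) =====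
theorem g2_spec : Claim_equal_g2 := by
  intro n _
  unfold Spec_g2 g2 g2_alt
  by_cases hn : n < 1
  · -- loop body never runs; B returns 0
    rw [if_pos hn]
    have h0 : n.toNat = 0 := by omega
    rw [h0]
    simp [g2Loop, show ¬(1 : Int) ≤ n by omega]
  · rw [if_neg hn]
    replace hn : 1 ≤ n := by omega
    show g2Loop (n.toNat + 1) n 0 1
      = PySem.Int.floordiv (PySem.Int.floordiv
          ((2:Int) ^ (n.toNat.log2 + 1) * 2 ^ (n.toNat.log2 + 1) - 1) 3
          - (2 ^ (n.toNat.log2 + 1) - 1)) 2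
    set m := n.toNat.log2 with hm
    have hb := pv_log2_bounds n.toNat (by omega)
    have hlo : (2:Int) ^ m ≤ n := by
      have := hb.1
      have h2 : ((2 ^ m : Nat) : Int) ≤ ((n.toNat : Nat) : Int) := by exact_mod_cast this
      push_cast at h2; omega
    have hhi : n < 2 ^ (m + 1) := by
      have := hb.2
      have h2 : ((n.toNat : Nat) : Int) < ((2 ^ (m + 1) : Nat) : Int) := by exact_mod_cast this
      push_cast at h2; omega
    have hfuel : m < n.toNat + 1 := by
      have h1 : m < 2 ^ m := Nat.lt_two_pow_self
      have h2 : (2:Int) ^ m ≤ n := hlo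
      have : ((2 ^ m : Nat) : Int) ≤ n := by push_cast; exact h2
      omega
    have hmain := pv_loop_closed m (n.toNat + 1) n 0 1 le_rfl hfuel
      (by simpa using hlo) (by simpa using hhi)
    -- evaluate B's floordivs exactly
    set p : Int := 2 ^ (m + 1) with hp
    have hp4 : p * p = 4 ^ (m + 1) := by
      rw [hp, show (4:Int) = 2 * 2 from rfl, mul_pow]
    have hdvd3 : (3 : Int) ∣ p * p - 1 := by rw [hp4]; exact pv_three_dvd (m + 1)
    obtain ⟨q, hq⟩ := hdvd3
    have hfd3 : PySem.Int.floordiv (p * p - 1) 3 = q := by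
      rw [PySem.Int.floordiv_eq_ediv_of_pos (by norm_num), hq, Int.mul_ediv_cancel_left _ (by norm_num)]
    rw [hfd3]
    -- q - (p - 1) is even: p is even, so p*p-1 ≡ -1, q = (p*p-1)/3 is odd, p-1 odd
    have hpeven : (2 : Int) ∣ p := ⟨2 ^ m, by rw [hp]; ring⟩
    obtain ⟨r, hr⟩ := hpeven
    have hqodd : q % 2 = 1 := by
      have : 3 * q = 4 * r * r - 1 := by rw [← hq, hr]; ring
      omega
    have hdvd2 : (2 : Int) ∣ q - (p - 1) := by
      rw [hr]; omega
    obtain ⟨w, hw⟩ := hdvd2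
    have hfd2 : PySem.Int.floordiv (q - (p - 1)) 2 = w := by
      rw [PySem.Int.floordiv_eq_ediv_of_pos (by norm_num), hw, Int.mul_ediv_cancel_left _ (by norm_num)]
    rw [hfd2]
    -- compare via the ×6 closed form
    have h6 : 6 * g2Loop (n.toNat + 1) n 0 1 = 6 * w := by
      rw [hmain]
      have : (6 : Int) * w = 3 * (2 * w) := by ring
      rw [this, ← hw]
      have hq3 : 3 * q = p * p - 1 := by omega
      have : (3:Int) * (q - (p - 1)) = (p * p - 1) - 3 * (p - 1) := by rw [mul_sub, hq3]
      rw [this, hp4, hp]; ring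
    omega
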